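-- pv_equiv track=rewrite | github.com/DawoudSheraz/Google-KickStart | Day 11/day_11.py | has_increasing_pair
-- ===== SOURCE A (Python) =====
-- def has_increasing_pair(password):
--     diffs = []
--     one_count = 0
--     for count in range(1, len(password)):
--         current = ord(password[count])
--         prev = ord(password[count - 1])
--         diffs.append(current - prev)
--
--     for diff in diffs:
--         if diff == 1:
--             one_count += 1
--             # one count == 2 means there are 2 consecutive 1s, which is only possible for cases like abc, def
--             # where ord diff is 1 among consecutive characters
--             if one_count == 2:
--                 break
--         else:
--             one_count = 0
--     return one_count >= 2
-- ===== SOURCE B (Python) =====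
-- def has_increasing_pair(password):
--     return any(
--         ord(password[i]) - ord(password[i - 1]) == 1
--         and ord(password[i - 1]) - ord(password[i - 2]) == 1
--         for i in range(2, len(password))
--     )
-- ===== Notes on version B (the rewrite author's own statement) =====
-- stated objective: simpler
-- what changed: Drops the intermediate diffs list and the reset-on-mismatch running counter with break; B checks each window of three consecutive characters directly with a single short-circuiting any() over triples.
import Mathlib
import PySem

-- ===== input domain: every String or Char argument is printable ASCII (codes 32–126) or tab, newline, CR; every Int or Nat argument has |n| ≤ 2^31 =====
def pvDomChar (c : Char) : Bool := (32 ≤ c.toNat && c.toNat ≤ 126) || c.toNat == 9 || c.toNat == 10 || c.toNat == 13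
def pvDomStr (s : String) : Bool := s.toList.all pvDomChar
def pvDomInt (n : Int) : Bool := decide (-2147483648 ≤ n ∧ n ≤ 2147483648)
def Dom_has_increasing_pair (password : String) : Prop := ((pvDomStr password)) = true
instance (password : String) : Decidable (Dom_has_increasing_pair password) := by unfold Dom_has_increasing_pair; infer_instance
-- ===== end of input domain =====

-- B drops A's intermediate diffs list and reset-on-mismatch counter, checking each triple of consecutive chars directly (simpler decomposition; return value only, no side effects).

-- ===== PORT A =====
-- A's second loop with its `break`: structural recursion over diffs carrying one_count.
def hipLoop : List Int → Int → Bool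
  | [], one_count => decide (one_count ≥ 2)
  | diff :: rest, one_count =>
    if diff = 1 then
      if one_count + 1 = 2 then decide ((one_count + 1 : Int) ≥ 2)   -- break
      else hipLoop rest (one_count + 1)
    else hipLoop rest 0

-- indices 1 ≤ count < len are always in range, so the pyGetD default ' ' is never used (exact).
def has_increasing_pair (password : String) : Bool :=
  let cs := password.toList
  let diffs : List Int :=
    (PySem.List.pyRange 1 (cs.length : Int) 1).foldl
      (fun acc count =>
        let current : Int := (PySem.List.pyGetD cs count ' ').toNat
        let prev : Int := (PySem.List.pyGetD cs (count - 1) ' ').toNat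
        acc ++ [current - prev]) []
  hipLoop diffs 0

-- ===== PORT B =====
-- indices 2 ≤ i < len keep i, i-1, i-2 in range, so the pyGetD default ' ' is never used (exact).
def has_increasing_pair_alt (password : String) : Bool :=
  let cs := password.toList
  (PySem.List.pyRange 2 (cs.length : Int) 1).any (fun i =>
    decide (((PySem.List.pyGetD cs i ' ').toNat : Int) - ((PySem.List.pyGetD cs (i - 1) ' ').toNat : Int) = 1) &&
    decide (((PySem.List.pyGetD cs (i - 1) ' ').toNat : Int) - ((PySem.List.pyGetD cs (i - 2) ' ').toNat : Int) = 1))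

-- ===== PRECONDITION & SPEC =====
def Spec_has_increasing_pair (password : String) (out : Bool) : Prop := out = has_increasing_pair_alt password
instance (password : String) (out : Bool) : Decidable (Spec_has_increasing_pair password out) := by unfold Spec_has_increasing_pair; infer_instance

-- ===== CLAIM (what is proved, stated in full; the proofs are below) =====
def Claim_equal_has_increasing_pair : Prop := ∀ (password : String), Dom_has_increasing_pair password → Spec_has_increasing_pair password (has_increasing_pair password)

-- ===== LEMMAS AND PROOFS =====

-- "two consecutive 1s somewhere in the list"
def twoB : List Int → Bool
  | a :: b :: t => (decide (a = 1) && decide (b = 1)) || twoB (b :: t)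
  | _ => false

-- the common characterisation both ports are reduced to
def Good (cs : List Char) : Prop :=
  ∃ j : Nat, j + 2 < cs.length ∧
    ((cs.getD (j + 1) ' ').toNat : Int) - ((cs.getD j ' ').toNat : Int) = 1 ∧
    ((cs.getD (j + 2) ' ').toNat : Int) - ((cs.getD (j + 1) ' ').toNat : Int) = 1

lemma hipLoop_char : ∀ ds : List Int,
    hipLoop ds 0 = twoB ds ∧ hipLoop ds 1 = ((ds.head? = some 1 : Bool) || twoB ds) := by
  intro ds
  induction ds with
  | nil => simp [hipLoop, twoB]
  | cons d rest ih =>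
    obtain ⟨ih0, ih1⟩ := ih
    constructor
    · by_cases hd : d = 1
      · subst hd
        have h : hipLoop (1 :: rest) 0 = hipLoop rest 1 := by simp [hipLoop]
        rw [h, ih1]
        cases rest with
        | nil => simp [twoB]
        | cons b t => simp [twoB]
      · have h : hipLoop (d :: rest) 0 = hipLoop rest 0 := by simp [hipLoop, hd]
        rw [h, ih0]
        cases rest with
        | nil => simp [twoB]
        | cons b t => simp [twoB, hd]
    · by_cases hd : d = 1
      · subst hd
        simp [hipLoop]
      · have h : hipLoop (d :: rest) 1 = hipLoop rest 0 := by simp [hipLoop, hd]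
        rw [h, ih0]
        cases rest with
        | nil => simp [twoB, hd]
        | cons b t => simp [twoB, hd]

lemma twoB_iff : ∀ ds : List Int,
    twoB ds = true ↔ ∃ j : Nat, ∃ _ : j + 1 < ds.length, ds[j] = 1 ∧ ds[j + 1] = 1 := by
  intro ds
  induction ds with
  | nil => simp [twoB]
  | cons a rest ih =>
    cases rest with
    | nil =>
      simp only [twoB]
      constructor
      · intro h; exact absurd h (by simp)
      · rintro ⟨j, hj, -⟩; simp at hj
    | cons b t =>
      simp only [twoB, Bool.or_eq_true, Bool.and_eq_true, decide_eq_true_eq, ih]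
      constructor
      · rintro (⟨ha, hb⟩ | ⟨j, hj, h1, h2⟩)
        · exact ⟨0, by simp, by simpa using ha, by simpa using hb⟩
        · exact ⟨j + 1, by simpa using hj, by simpa using h1, by simpa using h2⟩
      · rintro ⟨j, hj, h1, h2⟩
        cases j with
        | zero => exact Or.inl ⟨by simpa using h1, by simpa using h2⟩
        | succ k =>
          exact Or.inr ⟨k, by simpa using hj, by simpa using h1, by simpa using h2⟩

-- the diffs list A builds, as a zipWith
lemma diffs_eq (cs : List Char) :
    (PySem.List.pyRange 1 (cs.length : Int) 1).map
      (fun count => (((PySem.List.pyGetD cs count ' ').toNat : Int)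
                      - ((PySem.List.pyGetD cs (count - 1) ' ').toNat : Int)))
      = List.zipWith (fun a b => ((b.toNat : Int) - (a.toNat : Int))) cs cs.tail := by
  apply List.ext_getElem
  · simp only [List.length_map, PySem.List.length_pyRange_one, List.length_zipWith,
      List.length_tail]
    omega
  · intro i h1 h2
    have hlen : i + 1 < cs.length := by
      simp [List.length_zipWith] at h2; omega
    simp only [List.getElem_map, PySem.List.getElem_pyRange_one, List.getElem_zipWith,
      List.getElem_tail]
    rw [show ((1 : Int) + i) = ((i + 1 : Nat) : Int) from by push_cast; ring]
    rw [show (((i + 1 : Nat) : Int) - 1) = ((i : Nat) : Int) from by push_cast; ring]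
    rw [PySem.List.pyGetD_natCast, PySem.List.pyGetD_natCast,
      List.getD_eq_getElem _ _ hlen, List.getD_eq_getElem _ _ (by omega)]

lemma portA_iff (cs : List Char) :
    hipLoop ((PySem.List.pyRange 1 (cs.length : Int) 1).foldl
      (fun acc count =>
        acc ++ [(((PySem.List.pyGetD cs count ' ').toNat : Int)
                  - ((PySem.List.pyGetD cs (count - 1) ' ').toNat : Int))]) []) 0 = true
      ↔ Good cs := by
  rw [PySem.List.foldl_append_singleton_eq_map, (hipLoop_char _).1, diffs_eq, twoB_iff]
  unfold Good
  constructor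
  · rintro ⟨j, hj, h1, h2⟩
    have hlen : j + 2 < cs.length := by
      simp [List.length_zipWith] at hj; omega
    refine ⟨j, hlen, ?_, ?_⟩
    · rw [List.getD_eq_getElem _ _ (by omega), List.getD_eq_getElem _ _ (by omega)]
      simpa [List.getElem_zipWith, List.getElem_tail] using h1
    · rw [List.getD_eq_getElem _ _ (by omega), List.getD_eq_getElem _ _ (by omega)]
      simpa [List.getElem_zipWith, List.getElem_tail] using h2
  · rintro ⟨j, hj, h1, h2⟩
    rw [List.getD_eq_getElem _ _ (by omega), List.getD_eq_getElem _ _ (by omega)] at h1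
    rw [List.getD_eq_getElem _ _ (by omega), List.getD_eq_getElem _ _ (by omega)] at h2
    refine ⟨j, by simp [List.length_zipWith]; omega, ?_, ?_⟩
    · simpa [List.getElem_zipWith, List.getElem_tail] using h1
    · simpa [List.getElem_zipWith, List.getElem_tail] using h2

lemma portB_iff (cs : List Char) :
    ((PySem.List.pyRange 2 (cs.length : Int) 1).any (fun i =>
      decide (((PySem.List.pyGetD cs i ' ').toNat : Int) - ((PySem.List.pyGetD cs (i - 1) ' ').toNat : Int) = 1) &&
      decide (((PySem.List.pyGetD cs (i - 1) ' ').toNat : Int) - ((PySem.List.pyGetD cs (i - 2) ' ').toNat : Int) = 1)) = true)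
      ↔ Good cs := by
  rw [List.any_eq_true]
  unfold Good
  constructor
  · rintro ⟨i, hmem, hp⟩
    rw [PySem.List.mem_pyRange_one] at hmem
    obtain ⟨h2i, hin⟩ := hmem
    obtain ⟨n, rfl⟩ : ∃ n : Nat, i = (n : Int) := ⟨i.toNat, by omega⟩
    have hn2 : 2 ≤ n := by omega
    have hnlen : n < cs.length := by omega
    simp only [Bool.and_eq_true, decide_eq_true_eq] at hp
    rw [show ((n : Nat) : Int) - 1 = ((n - 1 : Nat) : Int) from by omega,
      show ((n : Nat) : Int) - 2 = ((n - 2 : Nat) : Int) from by omega,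
      PySem.List.pyGetD_natCast, PySem.List.pyGetD_natCast, PySem.List.pyGetD_natCast] at hp
    obtain ⟨h1, h2⟩ := hp
    refine ⟨n - 2, by omega, ?_, ?_⟩
    · rw [show n - 2 + 1 = n - 1 from by omega]
      exact h2
    · rw [show n - 2 + 2 = n from by omega, show n - 2 + 1 = n - 1 from by omega]
      exact h1
  · rintro ⟨j, hj, h1, h2⟩
    refine ⟨((j : Int) + 2), ?_, ?_⟩
    · rw [PySem.List.mem_pyRange_one]; omega
    · simp only [Bool.and_eq_true, decide_eq_true_eq]
      rw [show ((j : Int) + 2 - 2) = ((j : Nat) : Int) from by omega,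
        show ((j : Int) + 2 - 1) = ((j + 1 : Nat) : Int) from by push_cast; ring,
        show ((j : Int) + 2) = ((j + 2 : Nat) : Int) from by push_cast; ring,
        PySem.List.pyGetD_natCast, PySem.List.pyGetD_natCast, PySem.List.pyGetD_natCast]
      exact ⟨h2, h1⟩

-- ===== VERDICT (by name: the statement is the Claim_ definition above) =====
theorem has_increasing_pair_spec : Claim_equal_has_increasing_pair := by
  intro password _
  unfold Spec_has_increasing_pair has_increasing_pair has_increasing_pair_alt
  apply Bool.eq_iff_iff.mpr
  rw [portA_iff password.toList, portB_iff password.toList]
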